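-- pv_equiv track=rewrite | github.com/mirimSunwoo/CodingTest_programmers | COSPRO_2_goorm/소수의 갯수 구하기.py | solution
-- ===== SOURCE A (Python) =====
-- def solution(number):
-- 	count = 0
-- 	while number > 0:
-- 		# 정답은 while number>=0 에서 >=를 >로 바꿔줘야했습니다
-- 		# 흠 왜인지 생각해봤는데요
-- 		# while문이 0일때도 반복하면 무한 루프에 걸리기 때문이 아닐까 생각했습니다
-- 		# 마지막 수는 10으로 나머지 없이 나눠서 0이 될수밖에 없기 때문에 무한루프에 빠질 수있습니다.
-- 		# 그렇기 때문에 0을 포함하지 않을때 while문을 돌려줘야합니다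
--
-- 		n = number % 10
-- 		if n == 2 or n == 3 or n == 5 or n == 7:
-- 			count += 1
-- 		number //= 10
-- 	return count
-- ===== SOURCE B (Python) =====
-- def solution(number):
-- 	if number <= 0:
-- 		return 0
-- 	return sum(c in "2357" for c in str(number))
-- ===== Notes on version B (the rewrite author's own statement) =====
-- stated objective: idiomatic
-- what changed: B converts the number to its decimal string once and sums a membership test of each character in '2357', instead of A's while loop peeling digits with % 10 and //= 10; non-positive input returns 0 as in A (whose loop body never runs there).
import Mathlib
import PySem

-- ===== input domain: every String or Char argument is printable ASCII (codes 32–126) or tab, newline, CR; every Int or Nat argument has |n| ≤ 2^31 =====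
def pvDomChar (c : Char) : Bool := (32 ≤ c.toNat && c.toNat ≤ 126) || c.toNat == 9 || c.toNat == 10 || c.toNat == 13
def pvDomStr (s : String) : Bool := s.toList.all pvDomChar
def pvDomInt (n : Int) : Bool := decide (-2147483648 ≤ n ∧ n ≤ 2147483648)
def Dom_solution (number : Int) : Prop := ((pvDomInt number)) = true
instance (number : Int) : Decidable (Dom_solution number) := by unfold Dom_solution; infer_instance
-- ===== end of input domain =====

-- B counts prime digits by a single pass over str(number) instead of A's % 10 / //= 10 peeling loop (idiomatic; same cost).

-- ===== PORT A =====
-- A's while loop: peel the last digit with % 10, bump count on 2/3/5/7, divide by 10.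
def solutionLoop (number count : Int) : Int :=
  if h : number > 0 then
    let n := PySem.Int.mod number 10
    let count' := if n = 2 ∨ n = 3 ∨ n = 5 ∨ n = 7 then count + 1 else count
    solutionLoop (PySem.Int.floordiv number 10) count'
  else count
termination_by number.toNat
decreasing_by
  rw [PySem.Int.floordiv_eq_ediv_of_pos (by omega)]
  omega

def solution (number : Int) : Int := solutionLoop number 0

-- ===== PORT B =====
-- sum(c in "2357" for c in str(number)); membership of a single char in '2357' is list membership.
def solution_alt (number : Int) : Int :=
  if number ≤ 0 then 0
  else ((PySem.Int.toChars number).map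
    (fun c => if c ∈ ['2', '3', '5', '7'] then (1 : Int) else 0)).sum

-- ===== PRECONDITION & SPEC =====
def Spec_solution (number : Int) (out : Int) : Prop := out = solution_alt number
instance (number : Int) (out : Int) : Decidable (Spec_solution number out) := by unfold Spec_solution; infer_instance

-- ===== CLAIM (what is proved, stated in full; the proofs are below) =====
def Claim_equal_solution : Prop := ∀ (number : Int), Dom_solution number → Spec_solution number (solution number)

-- ===== LEMMAS AND PROOFS =====

-- The digit characters of a natural number, last digit last (what Nat.toDigits produces).
def digitsRec (n : Nat) : List Char :=
  if h : n / 10 = 0 then [Nat.digitChar (n % 10)]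
  else digitsRec (n / 10) ++ [Nat.digitChar (n % 10)]
termination_by n
decreasing_by omega

lemma toDigitsCore_eq_digitsRec (fuel : Nat) :
    ∀ n acc, n < fuel → Nat.toDigitsCore 10 fuel n acc = digitsRec n ++ acc := by
  induction fuel with
  | zero => intro n acc h; omega
  | succ f ih =>
    intro n acc h
    rw [Nat.toDigitsCore, digitsRec]
    by_cases h0 : n / 10 = 0
    · simp [h0]
    · simp only [h0, if_false]
      rw [ih (n / 10) _ (by omega)]
      simp

def primeWeight (c : Char) : Int := if c ∈ ['2', '3', '5', '7'] then 1 else 0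

lemma solutionLoop_eq (m : Nat) (hm : 0 < m) :
    ∀ c : Int, solutionLoop (m : Int) c = c + ((digitsRec m).map primeWeight).sum := by
  induction m using Nat.strong_induction_on with
  | _ m ih =>
    intro c
    rw [solutionLoop]
    have h10 : (0:Int) < 10 := by norm_num
    rw [dif_pos (by exact_mod_cast hm)]
    have hmod : PySem.Int.mod (m : Int) 10 = ((m % 10 : Nat) : Int) := by
      exact_mod_cast PySem.Int.mod_natCast m 10
    have hdiv : PySem.Int.floordiv (m : Int) 10 = ((m / 10 : Nat) : Int) := by
      exact_mod_cast PySem.Int.floordiv_natCast m 10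
    set c' : Int := if PySem.Int.mod (m : Int) 10 = 2 ∨ PySem.Int.mod (m : Int) 10 = 3 ∨
        PySem.Int.mod (m : Int) 10 = 5 ∨ PySem.Int.mod (m : Int) 10 = 7 then c + 1 else c with hc'
    have hw : c' = c + primeWeight (Nat.digitChar (m % 10)) := by
      rw [hc', hmod]
      have hr : m % 10 < 10 := Nat.mod_lt _ (by norm_num)
      set r := m % 10 with hrdef
      interval_cases r <;> simp [primeWeight, Nat.digitChar]
    rw [hdiv]
    by_cases h0 : m / 10 = 0
    · rw [h0]
      rw [solutionLoop]
      simp only [Nat.cast_zero, gt_iff_lt, lt_self_iff_false]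
      rw [digitsRec, dif_pos h0, ← hc', hw]
      simp [primeWeight]
    · have hd : digitsRec m = digitsRec (m / 10) ++ [Nat.digitChar (m % 10)] := by
        rw [digitsRec]; exact dif_neg h0
      rw [ih (m / 10) (by omega) (by omega) c', hd, hw]
      simp only [List.map_append, List.sum_append, List.map_cons, List.map_nil, List.sum_cons,
        List.sum_nil]
      ring

-- ===== VERDICT (by name: the statement is the Claim_ definition above) =====
theorem solution_spec : Claim_equal_solution := by
  intro number _
  unfold Spec_solution solution solution_alt
  by_cases h : number ≤ 0
  · rw [solutionLoop, dif_neg (by omega), if_pos h]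
  · rw [if_neg h]
    obtain ⟨m, rfl⟩ : ∃ m : Nat, number = (m : Int) :=
      ⟨number.toNat, by omega⟩
    have hm : 0 < m := by exact_mod_cast (by omega : (0:Int) < (m:Int))
    rw [solutionLoop_eq m hm 0, zero_add]
    have : PySem.Int.toChars (m : Int) = digitsRec m := by
      rw [PySem.Int.toChars]
      rw [if_neg (by omega)]
      simp only [Int.toNat_natCast]
      rw [Nat.toDigits, toDigitsCore_eq_digitsRec (m+1) m [] (by omega), List.append_nil]
    rw [this]
    rfl
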